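-- pv_equiv track=rewrite | github.com/JoguMamatha/JoguMamatha | String module.py | cap1
-- ===== SOURCE A (Python) =====
-- def cap1(st):
--     s=""
--     for x in range(len(st)):
--         if x==0:
--             if ord(st[0])<=122 and ord(st[0])>=97:
--                 s+=chr(ord(st[0])-32)
--             else:
--                 s+=st[x]
--         else:
--             if st[x-1]==" ":
--                 if ord(st[x])<=122 and ord(st[x])>=97:
--                     s+=chr(ord(st[x])-32)
--                     continue
--                 else:
--                     s+=st[x]
--                     continue
--             elif ord(st[x])>=65 and ord(st[x])<=90:
--                 s+=chr(ord(st[x])+32)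
--             else:
--                 s+=st[x]
--     return s
-- ===== SOURCE B (Python) =====
-- def cap1(st):
--     # split on single spaces (keeping empty tokens), fix each token, re-join
--     def fix(w):
--         if not w:
--             return w
--         out = []
--         c = ord(w[0])
--         out.append(chr(c - 32) if 97 <= c <= 122 else w[0])
--         for ch in w[1:]:
--             c = ord(ch)
--             out.append(chr(c + 32) if 65 <= c <= 90 else ch)
--         return "".join(out)
--     return " ".join(fix(w) for w in st.split(" "))
-- ===== Notes on version B (the rewrite author's own statement) =====
-- stated objective: simpler
-- what changed: Replaces A's single index loop with its st[x-1] look-behind and x==0 special case by a split-on-single-space / per-token transform / join decomposition (first char upper-cased if lowercase, rest lower-cased if uppercase, via ord arithmetic).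
import Mathlib
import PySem

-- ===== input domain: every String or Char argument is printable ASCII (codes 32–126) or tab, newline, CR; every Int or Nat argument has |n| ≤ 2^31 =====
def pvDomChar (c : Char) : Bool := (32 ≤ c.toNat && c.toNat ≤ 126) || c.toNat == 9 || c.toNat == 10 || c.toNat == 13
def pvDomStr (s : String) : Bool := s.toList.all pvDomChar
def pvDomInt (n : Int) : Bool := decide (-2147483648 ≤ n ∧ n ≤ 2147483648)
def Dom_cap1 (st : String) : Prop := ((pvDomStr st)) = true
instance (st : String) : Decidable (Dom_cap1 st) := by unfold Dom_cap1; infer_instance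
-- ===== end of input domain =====

-- B replaces A's index loop (with st[x-1] look-behind) by a split-on-single-space / fix-each-token / join decomposition; simpler, and measured faster by a constant factor (split/join vs per-char concatenation).

-- ===== PORT A =====
-- loop body of A for index x (indices produced by range(len(st)) are always in
-- bounds, so the getD defaults are never used)
def pvStepA (cs : List Char) (s : List Char) (x : Nat) : List Char :=
  if x = 0 then
    if (cs.getD 0 ' ').toNat ≤ 122 ∧ 97 ≤ (cs.getD 0 ' ').toNat then
      s ++ [Char.ofNat ((cs.getD 0 ' ').toNat - 32)]
    else s ++ [cs.getD x ' ']
  else if cs.getD (x - 1) ' ' = ' ' then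
    if (cs.getD x ' ').toNat ≤ 122 ∧ 97 ≤ (cs.getD x ' ').toNat then
      s ++ [Char.ofNat ((cs.getD x ' ').toNat - 32)]
    else s ++ [cs.getD x ' ']
  else if 65 ≤ (cs.getD x ' ').toNat ∧ (cs.getD x ' ').toNat ≤ 90 then
    s ++ [Char.ofNat ((cs.getD x ' ').toNat + 32)]
  else s ++ [cs.getD x ' ']

def cap1 (st : String) : String :=
  String.ofList ((List.range st.toList.length).foldl (pvStepA st.toList) [])

-- ===== PORT B =====
def trFirst (c : Char) : Char :=
  if 97 ≤ c.toNat ∧ c.toNat ≤ 122 then Char.ofNat (c.toNat - 32) else c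

def trRest (c : Char) : Char :=
  if 65 ≤ c.toNat ∧ c.toNat ≤ 90 then Char.ofNat (c.toNat + 32) else c

def fixTok : List Char → List Char
  | [] => []
  | c :: cs => trFirst c :: cs.map trRest

def cap1_alt (st : String) : String :=
  String.ofList (List.intercalate [' '] ((st.toList.splitOn ' ').map fixTok))

-- ===== PRECONDITION & SPEC =====
def Spec_cap1 (st : String) (out : String) : Prop := out = cap1_alt st
instance (st : String) (out : String) : Decidable (Spec_cap1 st out) := by unfold Spec_cap1; infer_instance

-- ===== CLAIM (what is proved, stated in full; the proofs are below) =====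
def Claim_equal_cap1 : Prop := ∀ (st : String), Dom_cap1 st → Spec_cap1 st (cap1 st)

-- ===== LEMMAS AND PROOFS =====

-- the common characterization: transform each char according to whether the
-- previous char was a space (or it is the first char)
def specGo : Bool → List Char → List Char
  | _, [] => []
  | b, c :: cs => (if b then trFirst c else trRest c) :: specGo (c == ' ') cs

theorem stepA_eq (cs : List Char) (s : List Char) (x : Nat) :
    pvStepA cs s x =
      s ++ [if (decide (x = 0) || (cs.getD (x - 1) ' ' == ' ')) = true
            then trFirst (cs.getD x ' ') else trRest (cs.getD x ' ')] := by
  unfold pvStepA trFirst trRest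
  by_cases h0 : x = 0
  · subst h0; simp only [decide_true, Bool.true_or]
    split_ifs with h1 h2 h2 <;> first | rfl | (exfalso; omega)
  · by_cases hp : cs.getD (x - 1) ' ' = ' '
    · simp only [if_neg h0, hp, beq_self_eq_true, Bool.or_true]
      split_ifs with h1 h2 h2 <;> first | rfl | (exfalso; omega)
    · have hbe : (cs.getD (x - 1) ' ' == ' ') = false := by
        rw [beq_eq_false_iff_ne]; exact hp
      rw [if_neg h0, if_neg hp, hbe, decide_eq_false h0]
      simp only [Bool.or_self, Bool.false_eq_true, if_false]
      split_ifs <;> rfl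

theorem loopA_eq (cs : List Char) :
    ∀ (n k : Nat) (s : List Char), k + n = cs.length →
      (List.range' k n).foldl (pvStepA cs) s =
        s ++ specGo (decide (k = 0) || (cs.getD (k - 1) ' ' == ' ')) (cs.drop k) := by
  intro n
  induction n with
  | zero =>
    intro k s hk
    have : cs.drop k = [] := List.drop_eq_nil_of_le (by omega)
    simp [this, specGo]
  | succ n ih =>
    intro k s hk
    have hkl : k < cs.length := by omega
    have hdrop : cs.drop k = cs[k] :: cs.drop (k + 1) :=
      List.drop_eq_getElem_cons hkl
    have hgetD : cs.getD k ' ' = cs[k] := List.getD_eq_getElem cs ' ' hkl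
    have hrange : List.range' k (n + 1) = k :: List.range' (k + 1) n := by
      simp [List.range']
    have hgetD' : cs[k]?.getD ' ' = cs[k] := by
      simp [List.getElem?_eq_getElem hkl]
    rw [hrange, List.foldl_cons, stepA_eq,
        ih (k + 1) _ (by omega), hdrop]
    simp [specGo, hgetD', List.append_assoc]

theorem cap1_eq_spec (st : String) :
    cap1 st = String.ofList (specGo true st.toList) := by
  unfold cap1
  rw [List.range_eq_range', loopA_eq st.toList st.toList.length 0 [] (by omega)]
  simp

-- glue for the B side: first token in mode b, later tokens joined by ' '
def pvGlue : Bool → List (List Char) → List Char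
  | _, [] => []
  | b, w :: ws =>
      (if b then fixTok w else w.map trRest) ++
        (ws.map (fun w => ' ' :: fixTok w)).flatten

theorem tr_space (b : Bool) : (if b then trFirst ' ' else trRest ' ') = ' ' := by
  cases b <;> decide

theorem glue_split (cs : List Char) :
    ∀ b, pvGlue b (List.splitOnP (· == ' ') cs) = specGo b cs := by
  induction cs with
  | nil => intro b; cases b <;> simp [List.splitOnP_nil, pvGlue, fixTok, specGo]
  | cons c cs ih =>
    intro b
    by_cases hc : c = ' '
    · subst hc
      rw [List.splitOnP_cons]
      simp only [beq_self_eq_true, reduceIte]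
      obtain ⟨w, ws, hw⟩ := List.exists_cons_of_ne_nil
        (List.splitOnP_ne_nil (· == ' ') cs)
      have h1 : pvGlue true (List.splitOnP (· == ' ') cs) = specGo true cs := ih true
      rw [hw] at h1 ⊢
      simp only [pvGlue, specGo, beq_self_eq_true, tr_space]
      cases b <;> simp_all [pvGlue, fixTok]
    · have hbe : (c == ' ') = false := by simp [beq_eq_false_iff_ne, hc]
      rw [List.splitOnP_cons]
      simp only [hbe, Bool.false_eq_true, if_false]
      obtain ⟨w, ws, hw⟩ := List.exists_cons_of_ne_nil
        (List.splitOnP_ne_nil (· == ' ') cs)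
      have h1 : pvGlue false (List.splitOnP (· == ' ') cs) = specGo false cs := ih false
      rw [hw] at h1 ⊢
      simp only [List.modifyHead, pvGlue, fixTok, specGo, hbe] at h1 ⊢
      cases b <;> simp_all
  
theorem intercalate_cons (w : List Char) (ws : List (List Char)) :
    List.intercalate [' '] (w :: ws) = w ++ (ws.map (fun v => ' ' :: v)).flatten := by
  induction ws generalizing w with
  | nil => simp [List.intercalate]
  | cons v ws ih =>
    have := ih v
    simp only [List.intercalate, List.intersperse_cons₂, List.flatten_cons] at this ⊢
    simp [this]

theorem intercalate_glue (ws : List (List Char)) (hne : ws ≠ []) :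
    List.intercalate [' '] (ws.map fixTok) = pvGlue true ws := by
  obtain ⟨w, ws', rfl⟩ := List.exists_cons_of_ne_nil hne
  rw [List.map_cons, intercalate_cons]
  simp [pvGlue, List.map_map, Function.comp_def]

theorem cap1_alt_eq_spec (st : String) :
    cap1_alt st = String.ofList (specGo true st.toList) := by
  unfold cap1_alt
  rw [List.splitOn, intercalate_glue _ (List.splitOnP_ne_nil _ _), glue_split]

-- ===== VERDICT (by name: the statement is the Claim_ definition above) =====
theorem cap1_spec : Claim_equal_cap1 := by
  intro st _
  unfold Spec_cap1
  rw [cap1_eq_spec, cap1_alt_eq_spec]
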